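-- pv_equiv track=rewrite | github.com/pkang6689-pixel/pkang6689-pixel.github.io | scripts/remove_taskbar_all.py | remove_standalone_script_blocks
-- ===== SOURCE A (Python) =====
-- def remove_standalone_script_blocks(lines):
--     """Remove the three standalone <script> IIFEs: login-signup-account-display, settings-menu-align, dark-mode-sync."""
--     markers = [
--         '// login-signup-account-display',
--         '// settings-menu-align',
--         '// dark-mode-sync',
--     ]
--     out = []
--     skip_block = False
--     for line in lines:
--         stripped = line.strip()
--         if not skip_block:
--             for marker in markers:
--                 if marker in stripped:
--                     # Remove preceding <script> tag that's already in out
--                     while out and out[-1].strip() == '':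
--                         out.pop()
--                     if out and '<script>' in out[-1]:
--                         out.pop()
--                     skip_block = True
--                     break
--             if not skip_block:
--                 out.append(line)
--         else:
--             if '</script>' in stripped:
--                 skip_block = False
--     return out
-- ===== SOURCE B (Python) =====
-- def remove_standalone_script_blocks(lines):
--     """Remove the three standalone <script> IIFEs: login-signup-account-display, settings-menu-align, dark-mode-sync."""
--     markers = [
--         '// login-signup-account-display',
--         '// settings-menu-align',
--         '// dark-mode-sync',
--     ]
--     out = []
--     rest = lines
--     while True:
--         k = next((i for i, l in enumerate(rest)
--                   if any(m in l.strip() for m in markers)), None)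
--         if k is None:
--             return out + rest
--         out = out + rest[:k]
--         while out and out[-1].strip() == '':
--             out.pop()
--         if out and '<script>' in out[-1]:
--             out.pop()
--         rest = rest[k + 1:]
--         e = next((i for i, l in enumerate(rest) if '</script>' in l.strip()), None)
--         rest = [] if e is None else rest[e + 1:]
-- ===== Notes on version B (the rewrite author's own statement) =====
-- stated objective: alternative
-- what changed: Replaced the per-line skip-flag state machine with a recursive segment splitter: repeatedly search for the next marker line, append the untouched prefix, trim trailing blanks and an optional <script> line, then jump directly past the matching </script> line.
import Mathlib
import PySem

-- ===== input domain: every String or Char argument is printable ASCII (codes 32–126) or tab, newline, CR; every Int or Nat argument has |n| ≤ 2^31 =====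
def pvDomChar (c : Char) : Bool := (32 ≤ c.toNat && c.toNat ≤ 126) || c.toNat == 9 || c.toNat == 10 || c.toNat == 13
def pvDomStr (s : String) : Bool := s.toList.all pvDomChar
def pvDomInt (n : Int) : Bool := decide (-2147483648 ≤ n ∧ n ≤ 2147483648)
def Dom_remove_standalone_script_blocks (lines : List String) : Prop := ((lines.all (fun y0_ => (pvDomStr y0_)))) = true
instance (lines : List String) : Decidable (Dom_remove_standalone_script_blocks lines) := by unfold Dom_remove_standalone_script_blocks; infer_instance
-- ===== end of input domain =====

-- B restructures the per-line skip-flag state machine into a recursive split at marker /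
-- closing-tag positions found by search (objective: alternative decomposition, same cost).


-- ===== PORT A =====
-- A keeps `out` as a reversed accumulator: append = cons, pop = tail, out[-1] = head.
def aMarkers : List String :=
  ["// login-signup-account-display", "// settings-menu-align", "// dark-mode-sync"]

-- `while out and out[-1].strip() == '': out.pop()` then `if out and '<script>' in out[-1]: out.pop()`
def aTrimRev (revOut : List String) : List String :=
  let r := revOut.dropWhile (fun l => PySem.Str.strip l == "")
  match r with
  | [] => []
  | h :: t => if PySem.Str.isIn "<script>" h then t else h :: t

def aStep (st : List String × Bool) (line : String) : List String × Bool :=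
  let stripped := PySem.Str.strip line
  if st.2 = false then
    if aMarkers.any (fun m => PySem.Str.isIn m stripped) then
      (aTrimRev st.1, true)
    else
      (line :: st.1, false)
  else
    (st.1, if PySem.Str.isIn "</script>" stripped then false else true)

def remove_standalone_script_blocks (lines : List String) : List String :=
  ((lines.foldl aStep ([], false)).1).reverse

-- ===== PORT B =====
def bMarkers : List String :=
  ["// login-signup-account-display", "// settings-menu-align", "// dark-mode-sync"]

def bIsMarker (l : String) : Bool :=
  bMarkers.any (fun m => PySem.Str.isIn m (PySem.Str.strip l))

def bIsClose (l : String) : Bool :=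
  PySem.Str.isIn "</script>" (PySem.Str.strip l)

-- the two pops of B's trim, on the reversed list
def bTrim (out : List String) : List String :=
  let r := out.reverse.dropWhile (fun l => PySem.Str.strip l == "")
  (match r with
   | [] => ([] : List String)
   | h :: t => if PySem.Str.isIn "<script>" h then t else h :: t).reverse

def bLoop (out : List String) (rest : List String) : List String :=
  match hfm : rest.findIdx? bIsMarker with
  | none => out ++ rest
  | some k =>
    let out2 := bTrim (out ++ rest.take k)
    let rest2 := rest.drop (k + 1)
    match rest2.findIdx? bIsClose with
    | none => bLoop out2 []
    | some e => bLoop out2 (rest2.drop (e + 1))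
termination_by rest.length
decreasing_by
  · have hk := (List.findIdx?_eq_some_iff_getElem.mp hfm).1
    simp; omega
  · have hk := (List.findIdx?_eq_some_iff_getElem.mp hfm).1
    simp; omega

def remove_standalone_script_blocks_alt (lines : List String) : List String :=
  bLoop [] lines

-- ===== PRECONDITION & SPEC =====
def Spec_remove_standalone_script_blocks (lines : List String) (out : List String) : Prop := out = remove_standalone_script_blocks_alt lines
instance (lines : List String) (out : List String) : Decidable (Spec_remove_standalone_script_blocks lines out) := by unfold Spec_remove_standalone_script_blocks; infer_instance

-- ===== CLAIM (what is proved, stated in full; the proofs are below) =====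
def Claim_equal_remove_standalone_script_blocks : Prop := ∀ (lines : List String), Dom_remove_standalone_script_blocks lines → Spec_remove_standalone_script_blocks lines (remove_standalone_script_blocks lines)

-- ===== LEMMAS AND PROOFS =====

-- no marker in the segment: A just appends every line
theorem foldA_no_marker (seg : List String) (revOut : List String)
    (h : ∀ l ∈ seg, bIsMarker l = false) :
    seg.foldl aStep (revOut, false) = (seg.reverse ++ revOut, false) := by
  induction seg generalizing revOut with
  | nil => simp
  | cons a t ih =>
    have ha : bIsMarker a = false := h a (by simp)
    have : aStep (revOut, false) a = (a :: revOut, false) := by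
      simp [aStep, bIsMarker, bMarkers, aMarkers] at ha ⊢
      simp [ha]
    rw [List.foldl_cons, this, ih _ (fun l hl => h l (by simp [hl]))]
    simp

-- skipping: A drops lines until the first closing tag
theorem foldA_skip (suf : List String) (revOut : List String) :
    suf.foldl aStep (revOut, true) =
      (match suf.findIdx? bIsClose with
       | none => (revOut, true)
       | some e => (suf.drop (e + 1)).foldl aStep (revOut, false)) := by
  induction suf with
  | nil => simp
  | cons a t ih =>
    by_cases hc : bIsClose a = true
    · have : aStep (revOut, true) a = (revOut, false) := by
        simp [aStep, bIsClose] at hc ⊢; simp [hc]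
      simp [List.foldl_cons, this, List.findIdx?_cons, hc]
    · have hcf : bIsClose a = false := by simpa using hc
      have : aStep (revOut, true) a = (revOut, true) := by
        simp [aStep, bIsClose] at hcf ⊢; simp [hcf]
      rw [List.foldl_cons, this, ih]
      simp [List.findIdx?_cons, hcf]
      cases h : t.findIdx? bIsClose <;> simp

theorem aStep_marker (a : String) (revOut : List String) (h : bIsMarker a = true) :
    aStep (revOut, false) a = (aTrimRev revOut, true) := by
  simp [bIsMarker, bMarkers] at h
  simp [aStep, aMarkers]
  rcases h with h | h | h <;> simp [h]

theorem bTrim_reverse (x : List String) : bTrim x.reverse = (aTrimRev x).reverse := by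
  simp [bTrim, aTrimRev]

-- main invariant: A's fold from (revOut, false) equals B's loop on (revOut.reverse, rest)
theorem main_inv : ∀ (n : Nat) (rest revOut : List String), rest.length ≤ n →
    ((rest.foldl aStep (revOut, false)).1).reverse = bLoop revOut.reverse rest := by
  intro n
  induction n with
  | zero =>
    intro rest revOut hlen
    have : rest = [] := by cases rest <;> simp_all
    subst this
    rw [bLoop]
    simp
  | succ n ih =>
    intro rest revOut hlen
    rw [bLoop]
    cases hidx : rest.findIdx? bIsMarker with
    | none =>
      have hall : ∀ l ∈ rest, bIsMarker l = false := by
        intro l hl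
        have := List.findIdx?_eq_none_iff.mp hidx
        simpa using this l hl
      simp only
      rw [foldA_no_marker rest revOut hall]
      simp
    | some k =>
      obtain ⟨hk, hmk, _⟩ := List.findIdx?_eq_some_iff_getElem.mp hidx
      -- split rest = take k ++ rest[k] :: drop (k+1)
      have hsplit : rest = rest.take k ++ rest[k] :: rest.drop (k + 1) := by
        conv_lhs => rw [← List.take_append_drop k rest]
        congr 1
        exact List.drop_eq_getElem_cons hk
      have hpre : ∀ l ∈ rest.take k, bIsMarker l = false := by
        intro l hl
        obtain ⟨j, hj, rfl⟩ := List.mem_take_iff_getElem.mp hl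
        have := (List.findIdx?_eq_some_iff_getElem.mp hidx).2.2 j (by omega)
        simpa using this
      conv_lhs => rw [hsplit]
      rw [List.foldl_append, foldA_no_marker _ revOut hpre, List.foldl_cons,
          aStep_marker _ _ hmk, foldA_skip]
      have hout2 : bTrim (revOut.reverse ++ rest.take k)
          = (aTrimRev ((rest.take k).reverse ++ revOut)).reverse := by
        have hrw : revOut.reverse ++ rest.take k = ((rest.take k).reverse ++ revOut).reverse := by
          simp
        rw [hrw, bTrim_reverse]
      cases hcl : (rest.drop (k + 1)).findIdx? bIsClose with
      | none =>
        simp only [hcl]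
        rw [bLoop]
        simp [hout2]
      | some e =>
        simp only [hcl]
        rw [ih _ _ (by simp only [List.length_drop]; omega)]
        rw [hout2]

-- ===== VERDICT (by name: the statement is the Claim_ definition above) =====
theorem remove_standalone_script_blocks_spec : Claim_equal_remove_standalone_script_blocks := by
  intro lines _
  unfold Spec_remove_standalone_script_blocks remove_standalone_script_blocks remove_standalone_script_blocks_alt
  have := main_inv lines.length lines [] (le_refl _)
  simpa using this
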